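-- pv_equiv track=rewrite | github.com/sallykim515/auto_crop | sample.py | find_keeps
-- ===== SOURCE A (Python) =====
-- def find_keeps(non_empty):
--     """
--     Takes ndarray of increasing index.
--     A jump in these indices suggests a location of smudge.
--     Returns cleaned up ndarray to keep only by excluding the location of smudges.
--     """
--     idx_left = []
--     idx_right = []
--
--     # one way to spot a smudge is if consecutive indices "jump"
--     for i in range(len(non_empty) - 1):
--         if non_empty[i + 1] - non_empty[i] > 10:
--             # save separately depending on the first or last half of the indices
--             if i <= len(non_empty) / 2:
--                 idx_left.append(i)
--             else:
--                 idx_right.append(i)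
--     # if on the first half the indices, its max is where valid index starts
--     if idx_left:
--         ml = non_empty[max(idx_left)]
--     else:
--         ml = min(non_empty)
--
--     if idx_right:
--         mr = non_empty[min(idx_right)]
--     else:
--         mr = max(non_empty)
--
--     return ml, mr
-- ===== SOURCE B (Python) =====
-- def find_keeps(non_empty):
--     """Same result as A: instead of collecting all jump positions into two lists
--     and taking max/min afterwards, scan downward from the midpoint for the last
--     left-half jump and forward from the midpoint for the first right-half jump,
--     stopping at the first hit."""
--     n = len(non_empty)
--     half = n // 2  # i <= n/2 for integer i is exactly i <= n//2
--
--     ml = None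
--     for i in range(min(n - 2, half), -1, -1):
--         if non_empty[i + 1] - non_empty[i] > 10:
--             ml = non_empty[i]
--             break
--     if ml is None:
--         ml = min(non_empty)
--
--     mr = None
--     for i in range(half + 1, n - 1):
--         if non_empty[i + 1] - non_empty[i] > 10:
--             mr = non_empty[i]
--             break
--     if mr is None:
--         mr = max(non_empty)
--
--     return ml, mr
-- ===== Notes on version B (the rewrite author's own statement) =====
-- stated objective: alternative
-- what changed: B drops A's two jump-index lists and the max()/min() passes over them: it scans downward from the midpoint for the last left-half jump and forward from the midpoint for the first right-half jump, each exiting at the first hit.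
import Mathlib
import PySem

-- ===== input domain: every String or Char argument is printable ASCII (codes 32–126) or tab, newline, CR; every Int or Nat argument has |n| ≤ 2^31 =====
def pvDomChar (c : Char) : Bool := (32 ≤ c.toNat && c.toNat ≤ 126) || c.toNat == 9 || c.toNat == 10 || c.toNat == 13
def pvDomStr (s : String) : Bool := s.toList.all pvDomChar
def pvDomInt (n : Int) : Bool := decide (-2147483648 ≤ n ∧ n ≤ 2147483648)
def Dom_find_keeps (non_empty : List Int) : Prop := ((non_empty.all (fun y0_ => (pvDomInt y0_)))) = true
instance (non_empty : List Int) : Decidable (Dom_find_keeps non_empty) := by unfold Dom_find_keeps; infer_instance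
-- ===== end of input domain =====

-- B replaces A's two jump-index lists (and the max()/min() passes over them) by two
-- early-exit scans from the midpoint: downward for the last left-half jump, forward
-- for the first right-half jump; objective: alternative (same O(n) cost, no intermediate lists).

-- ===== PORT A =====
-- the jump test `non_empty[i+1] - non_empty[i] > 10`; every index reached is in range,
-- so List.getD is exact for Python's indexing here
def pvJumpA (xs : List Int) (i : Nat) : Bool := decide (xs.getD (i+1) 0 - xs.getD i 0 > 10)

-- `i <= len(non_empty)/2` is a float comparison; for integer i and 0 ≤ n ≤ 2^31 the
-- floats are exact, so it is exactly `2*i ≤ n`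
def find_keeps (non_empty : List Int) : Int × Int :=
  let n := non_empty.length
  let lr := (List.range (n - 1)).foldl
    (fun (p : List Nat × List Nat) i =>
      if pvJumpA non_empty i then
        if 2 * i ≤ n then (p.1 ++ [i], p.2) else (p.1, p.2 ++ [i])
      else p) ([], [])
  let ml := if lr.1 ≠ [] then
              non_empty.getD ((PySem.List.max? lr.1 (fun x => x)).getD 0) 0
            else (PySem.List.min? non_empty (fun x => x)).getD 0  -- min([]) raises: excluded by Pre_
  let mr := if lr.2 ≠ [] then
              non_empty.getD ((PySem.List.min? lr.2 (fun x => x)).getD 0) 0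
            else (PySem.List.max? non_empty (fun x => x)).getD 0
  (ml, mr)

-- ===== PORT B =====
-- the same one-line jump test, as written in Source B
def pvJumpB (xs : List Int) (i : Nat) : Bool := decide (xs.getD (i+1) 0 - xs.getD i 0 > 10)

-- `for i in range(lo, -1, -1): if jump: ml = non_empty[i]; break`
def pvScanDown (xs : List Int) : Nat → Option Int
  | 0 => if pvJumpB xs 0 then some (xs.getD 0 0) else none
  | i + 1 => if pvJumpB xs (i+1) then some (xs.getD (i+1) 0) else pvScanDown xs i

-- `for i in range(s, s+k): if jump: mr = non_empty[i]; break`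
def pvScanUp (xs : List Int) : Nat → Nat → Option Int
  | _, 0 => none
  | i, k + 1 => if pvJumpB xs i then some (xs.getD i 0) else pvScanUp xs (i+1) k

def find_keeps_alt (non_empty : List Int) : Int × Int :=
  let n := non_empty.length
  let half := n / 2
  -- Python's range(min(n-2, half), -1, -1) is empty iff n < 2 (lo is negative there);
  -- the `2 ≤ n` guard expresses that emptiness for Nat subtraction
  let mlOpt := if 2 ≤ n then pvScanDown non_empty (min (n - 2) half) else none
  let ml := match mlOpt with
    | some v => v
    | none => (PySem.List.min? non_empty (fun x => x)).getD 0  -- min([]) raises: excluded by Pre_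
  let mrOpt := pvScanUp non_empty (half + 1) ((n - 1) - (half + 1))
  let mr := match mrOpt with
    | some v => v
    | none => (PySem.List.max? non_empty (fun x => x)).getD 0
  (ml, mr)

-- ===== PRECONDITION & SPEC =====
-- Pre_ excludes only the empty list, on which A's min()/max() raise ValueError
def Pre_find_keeps (non_empty : List Int) : Prop := non_empty ≠ []
instance (non_empty : List Int) : Decidable (Pre_find_keeps non_empty) := by unfold Pre_find_keeps; infer_instance
def pvWitness_find_keeps : List Int := [0, 1, 30, 31]

def Spec_find_keeps (non_empty : List Int) (out : Int × Int) : Prop := out = find_keeps_alt non_empty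
instance (non_empty : List Int) (out : Int × Int) : Decidable (Spec_find_keeps non_empty out) := by unfold Spec_find_keeps; infer_instance

-- ===== CLAIM (what is proved, stated in full; the proofs are below) =====
def Claim_equal_find_keeps : Prop := ∀ (non_empty : List Int), Dom_find_keeps non_empty → Pre_find_keeps non_empty → Spec_find_keeps non_empty (find_keeps non_empty)

-- ===== LEMMAS AND PROOFS =====

theorem pvJumpB_eq_A : pvJumpB = pvJumpA := rfl

-- A's fold appends to the two lists; characterize it as two filters of the range
theorem pvFoldA_char (xs : List Int) (n : Nat) :
    ∀ (m : Nat) (L R : List Nat),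
      (List.range m).foldl
        (fun (p : List Nat × List Nat) i =>
          if pvJumpA xs i then
            if 2 * i ≤ n then (p.1 ++ [i], p.2) else (p.1, p.2 ++ [i])
          else p) (L, R)
      = (L ++ (List.range m).filter (fun i => pvJumpA xs i && decide (2 * i ≤ n)),
         R ++ (List.range m).filter (fun i => pvJumpA xs i && !decide (2 * i ≤ n))) := by
  intro m
  induction m with
  | zero => simp
  | succ m ih =>
    intro L R
    rw [List.range_succ, List.foldl_append, ih, List.filter_append, List.filter_append]
    simp only [List.foldl_cons, List.foldl_nil, List.filter_cons, List.filter_nil]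
    by_cases hj : pvJumpA xs m
    · by_cases hc : 2 * m ≤ n <;> simp [hj, hc]
    · simp [hj]

-- restrict the left filter to the prefix of the range
theorem pvLeftRestrict (q : Nat → Bool) (c : Nat) :
    ∀ (m : Nat), (List.range m).filter (fun i => q i && decide (i ≤ c))
      = (List.range (min m (c + 1))).filter q := by
  intro m
  induction m with
  | zero => simp
  | succ m ih =>
    by_cases hm : m ≤ c
    · have h1 : min (m + 1) (c + 1) = (min m (c + 1)) + 1 := by omega
      have h2 : min m (c + 1) = m := by omega
      rw [List.range_succ, List.filter_append, ih, h1, h2, List.range_succ,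
        List.filter_append]
      simp [List.filter, hm]
    · have h1 : min (m + 1) (c + 1) = min m (c + 1) := by omega
      rw [List.range_succ, List.filter_append, ih, h1]
      simp [List.filter, hm]

-- restrict the right filter to the suffix of the range
theorem pvRightRestrict (q : Nat → Bool) (c : Nat) :
    ∀ (m : Nat), (List.range m).filter (fun i => q i && !decide (i ≤ c))
      = (List.range' (c + 1) (m - (c + 1))).filter q := by
  intro m
  induction m with
  | zero => simp
  | succ m ih =>
    by_cases hm : m ≤ c
    · have h1 : m + 1 - (c + 1) = m - (c + 1) := by omega
      rw [List.range_succ, List.filter_append, ih, h1]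
      simp [List.filter, hm]
    · have h1 : m + 1 - (c + 1) = (m - (c + 1)) + 1 := by omega
      have h2 : c + 1 + (m - (c + 1)) = m := by omega
      rw [List.range_succ, List.filter_append, ih, h1, List.range'_1_concat, h2,
        List.filter_append]
      simp [List.filter, hm]

-- a sorted-ascending foldl max is the last element
theorem pvFoldlMax (t : List Nat) : ∀ (x : Nat), (x :: t).Pairwise (· < ·) →
    some (t.foldl max x) = (x :: t).getLast? := by
  induction t with
  | nil => intro x _; simp
  | cons y t ih =>
    intro x hp
    have hxy : x < y := (List.pairwise_cons.1 hp).1 y (by simp)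
    have hp' : (y :: t).Pairwise (· < ·) := (List.pairwise_cons.1 hp).2
    have : max x y = y := by omega
    rw [List.foldl_cons, this, List.getLast?_cons_cons]
    exact ih y hp'

theorem pvMaxLast (l : List Nat) (h : l.Pairwise (· < ·)) :
    PySem.List.max? l (fun x => x) = l.getLast? := by
  cases l with
  | nil => simp [PySem.List.max?]
  | cons x t => rw [PySem.List.max?_id_cons]; exact pvFoldlMax t x h

theorem pvFoldlMin (t : List Nat) : ∀ (x : Nat), (∀ y ∈ t, x ≤ y) → t.foldl min x = x := by
  induction t with
  | nil => intro x _; rfl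
  | cons y t ih =>
    intro x h
    have : min x y = x := by have := h y (by simp); omega
    rw [List.foldl_cons, this]
    exact ih x (fun z hz => h z (by simp [hz]))

theorem pvMinHead (l : List Nat) (h : l.Pairwise (· < ·)) :
    PySem.List.min? l (fun x => x) = l.head? := by
  cases l with
  | nil => simp [PySem.List.min?]
  | cons x t =>
    rw [PySem.List.min?_id_cons]
    have : t.foldl min x = x :=
      pvFoldlMin t x (fun y hy => le_of_lt ((List.pairwise_cons.1 h).1 y hy))
    simp [this]

-- B's downward scan finds the last jump in range(k+1)
theorem pvScanDown_char (xs : List Int) : ∀ (k : Nat),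
    pvScanDown xs k
      = (((List.range (k + 1)).filter (fun i => pvJumpA xs i)).getLast?).map (fun i => xs.getD i 0) := by
  intro k
  induction k with
  | zero =>
    by_cases h : pvJumpA xs 0 <;>
      simp [pvScanDown, pvJumpB_eq_A, h, List.range_succ]
  | succ k ih =>
    rw [show k + 1 + 1 = (k + 1) + 1 from rfl, List.range_succ, List.filter_append,
      List.getLast?_append]
    by_cases h : pvJumpA xs (k + 1) <;>
      simp [pvScanDown, pvJumpB_eq_A, h, ih]

-- B's forward scan finds the first jump in range'(s, k)
theorem pvScanUp_char (xs : List Int) : ∀ (k s : Nat),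
    pvScanUp xs s k
      = (((List.range' s k).filter (fun i => pvJumpA xs i)).head?).map (fun i => xs.getD i 0) := by
  intro k
  induction k with
  | zero => intro s; simp [pvScanUp]
  | succ k ih =>
    intro s
    rw [List.range'_succ, List.filter_cons]
    by_cases h : pvJumpA xs s <;>
      simp [pvScanUp, pvJumpB_eq_A, h, ih]

-- ===== VERDICT (by name: the statement is the Claim_ definition above) =====
theorem find_keeps_spec : Claim_equal_find_keeps := by
  intro xs _ hpre
  unfold Spec_find_keeps find_keeps find_keeps_alt
  simp only []
  set n := xs.length with hn
  have hn1 : 1 ≤ n := by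
    cases xs with
    | nil => exact absurd rfl hpre
    | cons a t => simp [hn]
  set c := n / 2 with hc
  -- the two filtered index lists
  have hdec : ∀ i : Nat, (decide (2 * i ≤ n)) = (decide (i ≤ c)) := by
    intro i; rcases Nat.lt_or_ge i (n+1) with _ | _ <;> simp <;> omega
  have hfold := pvFoldA_char xs n (n - 1) [] []
  have hL : (List.range (n - 1)).filter (fun i => pvJumpA xs i && decide (2 * i ≤ n))
      = (List.range (min (n - 1) (c + 1))).filter (fun i => pvJumpA xs i) := by
    rw [show (fun i => pvJumpA xs i && decide (2 * i ≤ n))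
        = (fun i => pvJumpA xs i && decide (i ≤ c)) from funext fun i => by rw [hdec]]
    exact pvLeftRestrict _ c (n - 1)
  have hR : (List.range (n - 1)).filter (fun i => pvJumpA xs i && !decide (2 * i ≤ n))
      = (List.range' (c + 1) ((n - 1) - (c + 1))).filter (fun i => pvJumpA xs i) := by
    rw [show (fun i => pvJumpA xs i && !decide (2 * i ≤ n))
        = (fun i => pvJumpA xs i && !decide (i ≤ c)) from funext fun i => by rw [hdec]]
    exact pvRightRestrict _ c (n - 1)
  rw [hfold]
  simp only [List.nil_append, hL, hR]
  set lf := (List.range (min (n - 1) (c + 1))).filter (fun i => pvJumpA xs i) with hlf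
  set rf := (List.range' (c + 1) ((n - 1) - (c + 1))).filter (fun i => pvJumpA xs i) with hrf
  have hlfp : lf.Pairwise (· < ·) :=
    List.Pairwise.sublist List.filter_sublist List.pairwise_lt_range
  have hrfp : rf.Pairwise (· < ·) :=
    List.Pairwise.sublist List.filter_sublist (List.pairwise_lt_range' ..)
  -- left component
  have hml :
      (if lf ≠ [] then xs.getD ((PySem.List.max? lf (fun x => x)).getD 0) 0
       else (PySem.List.min? xs (fun x => x)).getD 0)
      = (match (if 2 ≤ n then pvScanDown xs (min (n - 2) c) else none) with
         | some v => v
         | none => (PySem.List.min? xs (fun x => x)).getD 0) := by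
    by_cases h2 : 2 ≤ n
    · have hmin : min (n - 2) c + 1 = min (n - 1) (c + 1) := by omega
      rw [if_pos h2, pvScanDown_char, hmin, ← hlf, pvMaxLast lf hlfp]
      cases hl : lf.getLast? with
      | none => simp [List.getLast?_eq_none_iff.1 hl]
      | some j =>
        have : lf ≠ [] := by intro h; rw [h] at hl; simp at hl
        simp [this]
    · -- n = 1: range (n-1) = range 0 = [], so lf = [] and both take the min branch
      have hlf0 : lf = [] := by
        rw [hlf, show min (n - 1) (c + 1) = 0 by omega]; rfl
      simp [hlf0, h2]
  -- right component
  have hmr :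
      (if rf ≠ [] then xs.getD ((PySem.List.min? rf (fun x => x)).getD 0) 0
       else (PySem.List.max? xs (fun x => x)).getD 0)
      = (match pvScanUp xs (c + 1) ((n - 1) - (c + 1)) with
         | some v => v
         | none => (PySem.List.max? xs (fun x => x)).getD 0) := by
    rw [pvScanUp_char, ← hrf, pvMinHead rf hrfp]
    cases hh : rf.head? with
    | none => simp [List.head?_eq_none_iff.1 hh]
    | some j =>
      have : rf ≠ [] := by intro h; rw [h] at hh; simp at hh
      simp [this]
  rw [hml, hmr]
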